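-- pv_equiv track=rewrite | github.com/Devesh-10/AZ | data-strategy-langgraph/backend/app/agents/remediation_agent.py | _fallback_remediation
-- ===== SOURCE A (Python) =====
-- def _fallback_remediation(issues: list[dict]) -> str:
--     """Generate a basic remediation plan if LLM is unavailable.
--
--     Args:
--         issues: Sorted list of issue dicts
--
--     Returns:
--         Basic markdown remediation plan
--     """
--     plan = "## Remediation Plan\n\n"
--
--     if not issues:
--         plan += "No data quality issues requiring remediation.\n"
--         return plan
--
--     # Group by priority
--     p1_issues = [i for i in issues if i.get("severity") in ("critical",)]
--     p2_issues = [i for i in issues if i.get("severity") in ("high",)]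
--     p3_issues = [i for i in issues if i.get("severity") in ("medium", "low")]
--
--     if p1_issues:
--         plan += "### P1 - Immediate (within 24 hours)\n\n"
--         for issue in p1_issues[:5]:
--             if issue["source"] == "rules":
--                 plan += (
--                     f"- **{issue.get('rule_name', 'Unknown')}** in `{issue['table']}`: "
--                     f"Fix {issue.get('violations', 0)} violations. "
--                     f"Rule: {issue.get('rule_id', 'N/A')}\n"
--                 )
--             else:
--                 plan += (
--                     f"- **{issue['dimension'].title()}** in `{issue['table']}`: "
--                     f"Score {issue.get('score', 0)}%, ~{issue.get('estimated_violations', 0)} "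
--                     f"affected records\n"
--                 )
--         plan += "\n"
--
--     if p2_issues:
--         plan += "### P2 - Short-term (within 1 week)\n\n"
--         for issue in p2_issues[:5]:
--             if issue["source"] == "rules":
--                 plan += (
--                     f"- **{issue.get('rule_name', 'Unknown')}** in `{issue['table']}`: "
--                     f"Fix {issue.get('violations', 0)} violations\n"
--                 )
--             else:
--                 plan += (
--                     f"- **{issue['dimension'].title()}** in `{issue['table']}`: "
--                     f"Score {issue.get('score', 0)}%\n"
--                 )
--         plan += "\n"
--
--     if p3_issues:
--         plan += "### P3 - Long-term (within 1 month)\n\n"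
--         for issue in p3_issues[:5]:
--             plan += f"- **{issue['dimension'].title()}** in `{issue['table']}`: {issue['description']}\n"
--         plan += "\n"
--
--     plan += "### Monitoring Recommendations\n\n"
--     plan += "- Run DQ profiling weekly to track dimension score trends\n"
--     plan += "- Execute rule validation daily on transactional tables\n"
--     plan += "- Set alerts for any dimension dropping below 90%\n"
--     plan += "- Review remediation progress in weekly data governance meeting\n"
--
--     return plan
-- ===== SOURCE B (Python) =====
-- def _p1_line(issue):
--     if issue["source"] == "rules":
--         return (
--             f"- **{issue.get('rule_name', 'Unknown')}** in `{issue['table']}`: "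
--             f"Fix {issue.get('violations', 0)} violations. "
--             f"Rule: {issue.get('rule_id', 'N/A')}\n"
--         )
--     return (
--         f"- **{issue['dimension'].title()}** in `{issue['table']}`: "
--         f"Score {issue.get('score', 0)}%, ~{issue.get('estimated_violations', 0)} "
--         f"affected records\n"
--     )
--
--
-- def _p2_line(issue):
--     if issue["source"] == "rules":
--         return (
--             f"- **{issue.get('rule_name', 'Unknown')}** in `{issue['table']}`: "
--             f"Fix {issue.get('violations', 0)} violations\n"
--         )
--     return (
--         f"- **{issue['dimension'].title()}** in `{issue['table']}`: "
--         f"Score {issue.get('score', 0)}%\n"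
--     )
--
--
-- def _p3_line(issue):
--     return f"- **{issue['dimension'].title()}** in `{issue['table']}`: {issue['description']}\n"
--
--
-- def _fallback_remediation(issues: list[dict]) -> str:
--     """Single pass over the issues: format each one into its priority bucket
--     (at most five lines per bucket), then emit the buckets."""
--     plan = "## Remediation Plan\n\n"
--     if not issues:
--         return plan + "No data quality issues requiring remediation.\n"
--
--     p1, p2, p3 = [], [], []
--     for issue in issues:
--         sev = issue.get("severity")
--         if sev == "critical" and len(p1) < 5:
--             p1.append(_p1_line(issue))
--         elif sev == "high" and len(p2) < 5:
--             p2.append(_p2_line(issue))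
--         elif sev in ("medium", "low") and len(p3) < 5:
--             p3.append(_p3_line(issue))
--
--     for header, lines in (
--         ("### P1 - Immediate (within 24 hours)\n\n", p1),
--         ("### P2 - Short-term (within 1 week)\n\n", p2),
--         ("### P3 - Long-term (within 1 month)\n\n", p3),
--     ):
--         if lines:
--             plan += header
--             for line in lines:
--                 plan += line
--             plan += "\n"
--
--     plan += "### Monitoring Recommendations\n\n"
--     plan += "- Run DQ profiling weekly to track dimension score trends\n"
--     plan += "- Execute rule validation daily on transactional tables\n"
--     plan += "- Set alerts for any dimension dropping below 90%\n"
--     plan += "- Review remediation progress in weekly data governance meeting\n"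
--     return plan
-- ===== Notes on version B (the rewrite author's own statement) =====
-- stated objective: alternative
-- what changed: A scans the issue list three times with list comprehensions and then slices each filtered list to five; B makes one pass over the issues, formatting each issue's line on the fly into the right priority bucket (capped at five lines per bucket), and then emits the pre-formatted buckets.
import Mathlib
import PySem

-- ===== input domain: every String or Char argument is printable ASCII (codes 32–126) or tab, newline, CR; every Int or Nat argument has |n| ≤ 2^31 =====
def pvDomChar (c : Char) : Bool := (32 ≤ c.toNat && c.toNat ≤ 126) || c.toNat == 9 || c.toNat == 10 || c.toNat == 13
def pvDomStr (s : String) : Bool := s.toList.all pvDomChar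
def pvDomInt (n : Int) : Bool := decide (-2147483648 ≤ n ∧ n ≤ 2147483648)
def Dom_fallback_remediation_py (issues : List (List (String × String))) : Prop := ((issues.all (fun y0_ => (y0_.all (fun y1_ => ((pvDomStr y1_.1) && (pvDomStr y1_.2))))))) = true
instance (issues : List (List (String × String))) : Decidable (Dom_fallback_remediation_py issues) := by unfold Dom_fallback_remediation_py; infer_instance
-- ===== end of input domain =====

-- B replaces A's three filter passes over `issues` by ONE pass that formats each
-- issue into its priority bucket (capped at five lines), then emits the buckets.

-- Python str.title(), exact on the ASCII domain (cased character = ASCII letter)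
def pyTitleAux : Bool → List Char → List Char
  | _, [] => []
  | prevCased, c :: cs =>
    if PySem.Chars.isalpha c then
      (if prevCased then PySem.Chars.lowerChar c else PySem.Chars.upperChar c) :: pyTitleAux true cs
    else
      c :: pyTitleAux false cs

def pyTitle (s : String) : String := String.ofList (pyTitleAux false s.toList)

-- the three per-issue line formats (identical f-string text in A and in B)
def lineP1 (d : PySem.Dict String String) : String :=
  if PySem.Dict.get? d "source" = some "rules" then
    "- **" ++ PySem.Dict.getD d "rule_name" "Unknown" ++ "** in `"
      ++ ((PySem.Dict.get? d "table").getD "") ++ "`: Fix "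
      ++ PySem.Dict.getD d "violations" "0" ++ " violations. Rule: "
      ++ PySem.Dict.getD d "rule_id" "N/A" ++ "\n"
  else
    "- **" ++ pyTitle ((PySem.Dict.get? d "dimension").getD "") ++ "** in `"
      ++ ((PySem.Dict.get? d "table").getD "") ++ "`: Score "
      ++ PySem.Dict.getD d "score" "0" ++ "%, ~"
      ++ PySem.Dict.getD d "estimated_violations" "0" ++ " affected records\n"

def lineP2 (d : PySem.Dict String String) : String :=
  if PySem.Dict.get? d "source" = some "rules" then
    "- **" ++ PySem.Dict.getD d "rule_name" "Unknown" ++ "** in `"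
      ++ ((PySem.Dict.get? d "table").getD "") ++ "`: Fix "
      ++ PySem.Dict.getD d "violations" "0" ++ " violations\n"
  else
    "- **" ++ pyTitle ((PySem.Dict.get? d "dimension").getD "") ++ "** in `"
      ++ ((PySem.Dict.get? d "table").getD "") ++ "`: Score "
      ++ PySem.Dict.getD d "score" "0" ++ "%\n"

def lineP3 (d : PySem.Dict String String) : String :=
  "- **" ++ pyTitle ((PySem.Dict.get? d "dimension").getD "") ++ "** in `"
    ++ ((PySem.Dict.get? d "table").getD "") ++ "`: "
    ++ ((PySem.Dict.get? d "description").getD "") ++ "\n"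

-- ===== PORT A =====
def fallback_remediation_py (issues : List (List (String × String))) : String :=
  let plan := "## Remediation Plan\n\n"
  if issues = [] then
    plan ++ "No data quality issues requiring remediation.\n"
  else
    let ds := issues.map PySem.Dict.ofList
    let p1Issues := ds.filter (fun i => PySem.Dict.get? i "severity" == some "critical")
    let p2Issues := ds.filter (fun i => PySem.Dict.get? i "severity" == some "high")
    let p3Issues := ds.filter (fun i =>
      PySem.Dict.get? i "severity" == some "medium" || PySem.Dict.get? i "severity" == some "low")
    let plan := if p1Issues = [] then plan else
      ((p1Issues.take 5).foldl (fun acc d => acc ++ lineP1 d)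
        (plan ++ "### P1 - Immediate (within 24 hours)\n\n")) ++ "\n"
    let plan := if p2Issues = [] then plan else
      ((p2Issues.take 5).foldl (fun acc d => acc ++ lineP2 d)
        (plan ++ "### P2 - Short-term (within 1 week)\n\n")) ++ "\n"
    let plan := if p3Issues = [] then plan else
      ((p3Issues.take 5).foldl (fun acc d => acc ++ lineP3 d)
        (plan ++ "### P3 - Long-term (within 1 month)\n\n")) ++ "\n"
    plan ++ "### Monitoring Recommendations\n\n"
      ++ "- Run DQ profiling weekly to track dimension score trends\n"
      ++ "- Execute rule validation daily on transactional tables\n"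
      ++ "- Set alerts for any dimension dropping below 90%\n"
      ++ "- Review remediation progress in weekly data governance meeting\n"

-- ===== PORT B =====
-- one step of B's single pass: route the issue's formatted line into its bucket
def bStep (acc : List String × List String × List String) (raw : List (String × String)) :
    List String × List String × List String :=
  let d := PySem.Dict.ofList raw
  let sev := PySem.Dict.get? d "severity"
  if sev = some "critical" ∧ acc.1.length < 5 then
    (acc.1 ++ [lineP1 d], acc.2.1, acc.2.2)
  else if sev = some "high" ∧ acc.2.1.length < 5 then
    (acc.1, acc.2.1 ++ [lineP2 d], acc.2.2)
  else if (sev = some "medium" ∨ sev = some "low") ∧ acc.2.2.length < 5 then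
    (acc.1, acc.2.1, acc.2.2 ++ [lineP3 d])
  else acc

def fallback_remediation_py_alt (issues : List (List (String × String))) : String :=
  let plan := "## Remediation Plan\n\n"
  if issues = [] then
    plan ++ "No data quality issues requiring remediation.\n"
  else
    let buckets := issues.foldl bStep ([], [], [])
    -- the (header, lines) tuple loop of Source B, unrolled over its three iterations
    let plan := if buckets.1 = [] then plan else
      (buckets.1.foldl (· ++ ·) (plan ++ "### P1 - Immediate (within 24 hours)\n\n")) ++ "\n"
    let plan := if buckets.2.1 = [] then plan else
      (buckets.2.1.foldl (· ++ ·) (plan ++ "### P2 - Short-term (within 1 week)\n\n")) ++ "\n"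
    let plan := if buckets.2.2 = [] then plan else
      (buckets.2.2.foldl (· ++ ·) (plan ++ "### P3 - Long-term (within 1 month)\n\n")) ++ "\n"
    plan ++ "### Monitoring Recommendations\n\n"
      ++ "- Run DQ profiling weekly to track dimension score trends\n"
      ++ "- Execute rule validation daily on transactional tables\n"
      ++ "- Set alerts for any dimension dropping below 90%\n"
      ++ "- Review remediation progress in weekly data governance meeting\n"

-- ===== PRECONDITION & SPEC =====
-- Pre_ excludes exactly the inputs on which A raises KeyError: an issue that is
-- actually rendered (among the first five of its severity bucket) must carry the
-- keys the rendering subscripts directly ("source"/"table", "dimension" for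
-- non-rules lines, and "dimension"/"table"/"description" for P3 lines).
def pvNeedsP12 (raw : List (String × String)) : Prop :=
  (PySem.Dict.get? (PySem.Dict.ofList raw) "source").isSome ∧
  (PySem.Dict.get? (PySem.Dict.ofList raw) "table").isSome ∧
  (PySem.Dict.get? (PySem.Dict.ofList raw) "source" = some "rules" ∨
    (PySem.Dict.get? (PySem.Dict.ofList raw) "dimension").isSome)

def pvNeedsP3 (raw : List (String × String)) : Prop :=
  (PySem.Dict.get? (PySem.Dict.ofList raw) "dimension").isSome ∧
  (PySem.Dict.get? (PySem.Dict.ofList raw) "table").isSome ∧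
  (PySem.Dict.get? (PySem.Dict.ofList raw) "description").isSome

def Pre_fallback_remediation_py (issues : List (List (String × String))) : Prop :=
  (∀ raw ∈ (issues.filter (fun r =>
      PySem.Dict.get? (PySem.Dict.ofList r) "severity" == some "critical")).take 5, pvNeedsP12 raw) ∧
  (∀ raw ∈ (issues.filter (fun r =>
      PySem.Dict.get? (PySem.Dict.ofList r) "severity" == some "high")).take 5, pvNeedsP12 raw) ∧
  (∀ raw ∈ (issues.filter (fun r =>
      PySem.Dict.get? (PySem.Dict.ofList r) "severity" == some "medium" ||
      PySem.Dict.get? (PySem.Dict.ofList r) "severity" == some "low")).take 5, pvNeedsP3 raw)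

instance (issues : List (List (String × String))) : Decidable (Pre_fallback_remediation_py issues) := by
  unfold Pre_fallback_remediation_py pvNeedsP12 pvNeedsP3; infer_instance

def pvWitness_fallback_remediation_py : (List (List (String × String))) :=
  [[("severity", "critical"), ("source", "rules"), ("table", "t")]]

def Spec_fallback_remediation_py (issues : List (List (String × String))) (out : String) : Prop :=
  out = fallback_remediation_py_alt issues
instance (issues : List (List (String × String))) (out : String) :
    Decidable (Spec_fallback_remediation_py issues out) := by
  unfold Spec_fallback_remediation_py; infer_instance

-- ===== CLAIM (what is proved, stated in full; the proofs are below) =====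
def Claim_equal_fallback_remediation_py : Prop :=
  ∀ (issues : List (List (String × String))), Dom_fallback_remediation_py issues →
    Pre_fallback_remediation_py issues →
    Spec_fallback_remediation_py issues (fallback_remediation_py issues)

-- ===== LEMMAS AND PROOFS =====

-- B's single pass computes, per bucket, the formatted first-five of A's filter
lemma bucketsLemma (l : List (List (String × String))) :
    ∀ (a b c : List String), a.length ≤ 5 → b.length ≤ 5 → c.length ≤ 5 →
    l.foldl bStep (a, b, c) =
      (a ++ ((l.filter (fun r => PySem.Dict.get? (PySem.Dict.ofList r) "severity" == some "critical")).take
          (5 - a.length)).map (fun r => lineP1 (PySem.Dict.ofList r)),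
       b ++ ((l.filter (fun r => PySem.Dict.get? (PySem.Dict.ofList r) "severity" == some "high")).take
          (5 - b.length)).map (fun r => lineP2 (PySem.Dict.ofList r)),
       c ++ ((l.filter (fun r =>
            PySem.Dict.get? (PySem.Dict.ofList r) "severity" == some "medium" ||
            PySem.Dict.get? (PySem.Dict.ofList r) "severity" == some "low")).take
          (5 - c.length)).map (fun r => lineP3 (PySem.Dict.ofList r))) := by

  induction l with
  | nil => intro a b c _ _ _; simp
  | cons x xs ih =>
    intro a b c ha hb hc
    simp only [List.foldl_cons]
    by_cases h1 : PySem.Dict.get? (PySem.Dict.ofList x) "severity" = some "critical"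
    · by_cases hl : a.length < 5
      · have hstep : bStep (a, b, c) x = (a ++ [lineP1 (PySem.Dict.ofList x)], b, c) := by
          simp [bStep, h1, hl]
        rw [hstep, ih _ _ _ (by simp; omega) hb hc]
        have e1 : 5 - a.length = (5 - (a.length + 1)) + 1 := by omega
        simp [List.filter_cons, beq_iff_eq, h1, e1, List.take_succ_cons, List.append_assoc]
      · have hstep : bStep (a, b, c) x = (a, b, c) := by
          simp [bStep, h1, hl]
        rw [hstep, ih _ _ _ ha hb hc]
        have e5 : 5 - a.length = 0 := by omega
        simp [List.filter_cons, beq_iff_eq, h1, e5]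
    · by_cases h2 : PySem.Dict.get? (PySem.Dict.ofList x) "severity" = some "high"
      · by_cases hl : b.length < 5
        · have hstep : bStep (a, b, c) x = (a, b ++ [lineP2 (PySem.Dict.ofList x)], c) := by
            simp [bStep, h1, h2, hl]
          rw [hstep, ih _ _ _ ha (by simp; omega) hc]
          have e1 : 5 - b.length = (5 - (b.length + 1)) + 1 := by omega
          simp [List.filter_cons, beq_iff_eq, h1, h2, e1, List.take_succ_cons, List.append_assoc]
        · have hstep : bStep (a, b, c) x = (a, b, c) := by
            simp [bStep, h1, h2, hl]
          rw [hstep, ih _ _ _ ha hb hc]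
          have e5 : 5 - b.length = 0 := by omega
          simp [List.filter_cons, beq_iff_eq, h1, h2, e5]
      · by_cases h3 : PySem.Dict.get? (PySem.Dict.ofList x) "severity" = some "medium" ∨
            PySem.Dict.get? (PySem.Dict.ofList x) "severity" = some "low"
        · by_cases hl : c.length < 5
          · have hstep : bStep (a, b, c) x = (a, b, c ++ [lineP3 (PySem.Dict.ofList x)]) := by
              rcases h3 with h3 | h3 <;> simp [bStep, h1, h2, h3, hl]
            rw [hstep, ih _ _ _ ha hb (by simp; omega)]
            have e1 : 5 - c.length = (5 - (c.length + 1)) + 1 := by omega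
            rcases h3 with h3 | h3 <;>
              simp [List.filter_cons, beq_iff_eq, h1, h2, h3, e1, List.take_succ_cons,
                List.append_assoc]
          · have hstep : bStep (a, b, c) x = (a, b, c) := by
              rcases h3 with h3 | h3 <;> simp [bStep, h1, h2, h3, hl]
            rw [hstep, ih _ _ _ ha hb hc]
            have e5 : 5 - c.length = 0 := by omega
            rcases h3 with h3 | h3 <;> simp [List.filter_cons, beq_iff_eq, h1, h2, h3, e5]
        · obtain ⟨h3m, h3l⟩ := not_or.mp h3
          have hstep : bStep (a, b, c) x = (a, b, c) := by
            simp [bStep, h1, h2, h3m, h3l]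
          rw [hstep, ih _ _ _ ha hb hc]
          simp [List.filter_cons, beq_iff_eq, h1, h2, h3m, h3l]

lemma emitLemma (L : List (List (String × String))) (fmt : PySem.Dict String String → String)
    (s h : String) :
    (if L.map PySem.Dict.ofList = [] then s
     else (((L.map PySem.Dict.ofList).take 5).foldl (fun acc d => acc ++ fmt d) (s ++ h)) ++ "\n")
  = (if (L.take 5).map (fun r => fmt (PySem.Dict.ofList r)) = [] then s
     else (((L.take 5).map (fun r => fmt (PySem.Dict.ofList r))).foldl (· ++ ·) (s ++ h)) ++ "\n") := by

  cases L with
  | nil => simp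
  | cons x xs =>
    have hA : ¬ ((x :: xs).map PySem.Dict.ofList = []) := by simp
    have hB : ¬ (((x :: xs).take 5).map (fun r => fmt (PySem.Dict.ofList r)) = []) := by
      simp [List.take_eq_nil_iff]
    rw [if_neg hA, if_neg hB]
    congr 1
    rw [← List.map_take, List.foldl_map, List.foldl_map]

lemma mainEq (issues : List (List (String × String))) :
    fallback_remediation_py issues = fallback_remediation_py_alt issues := by

  by_cases h : issues = []
  · subst h; rfl
  · simp only [fallback_remediation_py, fallback_remediation_py_alt, if_neg h]
    rw [bucketsLemma issues [] [] [] (by simp) (by simp) (by simp)]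
    simp only [List.nil_append, List.length_nil, Nat.sub_zero]
    rw [List.filter_map, List.filter_map, List.filter_map]
    simp only [Function.comp_def]
    rw [emitLemma (issues.filter fun r =>
          PySem.Dict.get? (PySem.Dict.ofList r) "severity" == some "critical") lineP1,
        emitLemma (issues.filter fun r =>
          PySem.Dict.get? (PySem.Dict.ofList r) "severity" == some "high") lineP2,
        emitLemma (issues.filter fun r =>
          PySem.Dict.get? (PySem.Dict.ofList r) "severity" == some "medium" ||
          PySem.Dict.get? (PySem.Dict.ofList r) "severity" == some "low") lineP3]

-- ===== VERDICT (by name: the statement is the Claim_ definition above) =====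
theorem fallback_remediation_py_spec : Claim_equal_fallback_remediation_py := by
  intro issues _ _
  exact mainEq issues
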